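-- pv_equiv track=rewrite | github.com/sinkyoungdeok/ps | programmers/level2/기능개발.py | solution
-- ===== SOURCE A (Python) =====
-- def solution(progresses, speeds):
--     answer = []
--
--     date = 0
--     i = 0
--     day = 0
--
--     while i < len(progresses):
--         progress = progresses[i]
--         speed = speeds[i]
--
--         if progress + date * speed >= 100:
--             i+=1
--             day += 1
--         elif day > 0:
--             answer.append(day)
--             day = 0
--             date+=1
--         else:
--             date+=1
--     answer.append(day)
--
--     return answer
-- ===== SOURCE B (Python) =====
-- def solution(progresses, speeds):
--     # Per-task finish day (ceil of remaining work over speed, clamped at 0),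
--     # then one grouping pass over those days.
--     days = [max(0, -(-(100 - p) // s)) for p, s in zip(progresses, speeds)]
--     answer = []
--     cur, count = 0, 0
--     for d in days:
--         if count == 0:
--             cur, count = d, 1
--         elif d <= cur:
--             count += 1
--         else:
--             answer.append(count)
--             cur, count = d, 1
--     answer.append(count)
--     return answer
-- ===== Notes on version B (the rewrite author's own statement) =====
-- stated objective: simpler
-- what changed: Replaces A's day-by-day while-loop simulation (advancing a date counter one day at a time) by a closed-form per-task finish day via ceiling division followed by a single grouping pass; Pre_ excludes inputs where A raises IndexError (speeds shorter than progresses) or loops forever (an unfinished task with speed <= 0), and thereby also some inputs with a speed <= 0 on which A still returns because the task is already >= 100 when reached.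
-- outside the precondition, e.g. on solution([150], [0]): A returns [1], B raises ZeroDivisionError; on solution([150, 60], [-5, 10]): A returns [1, 1], B returns [2]
import Mathlib
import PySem

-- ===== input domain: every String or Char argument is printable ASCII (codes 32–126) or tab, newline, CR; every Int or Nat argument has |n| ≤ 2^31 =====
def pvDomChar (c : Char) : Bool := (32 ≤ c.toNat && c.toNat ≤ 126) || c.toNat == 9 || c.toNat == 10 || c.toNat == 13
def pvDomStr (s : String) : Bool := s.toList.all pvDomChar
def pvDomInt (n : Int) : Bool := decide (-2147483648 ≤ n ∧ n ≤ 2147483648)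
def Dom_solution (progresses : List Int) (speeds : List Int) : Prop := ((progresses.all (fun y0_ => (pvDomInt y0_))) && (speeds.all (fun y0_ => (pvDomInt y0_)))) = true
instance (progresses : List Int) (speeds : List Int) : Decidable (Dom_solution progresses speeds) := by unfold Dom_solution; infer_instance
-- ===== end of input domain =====

-- B replaces A's day-by-day simulation by a closed-form per-task finish day (ceiling division)
-- followed by one grouping pass (objective: simpler / alternative algorithm; equality proved on Pre_).


-- ===== PORT A =====
-- fuel bound for A's while loop: its date counter advances at most (100 - p).toNat times per task
-- when every speed is ≥ 1 (Pre_), so length + pvSumW + 1 iterations always suffice there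
def pvSumW : List (Int × Int) → Nat
  | [] => 0
  | (p, _) :: r => (100 - p).toNat + pvSumW r

-- the while loop, step for step: consume task / flush day and advance date / advance date
def solutionLoop : Nat → List (Int × Int) → Int → Int → List Int → List Int
  | 0, _, _, day, answer => answer ++ [day]
  | _ + 1, [], _, day, answer => answer ++ [day]
  | f + 1, (p, s) :: rest, date, day, answer =>
    if 100 ≤ p + date * s then solutionLoop f rest date (day + 1) answer
    else if 0 < day then solutionLoop f ((p, s) :: rest) (date + 1) 0 (answer ++ [day])
    else solutionLoop f ((p, s) :: rest) (date + 1) day answer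

def solution (progresses : List Int) (speeds : List Int) : List Int :=
  solutionLoop (((progresses.zip speeds).length + pvSumW (progresses.zip speeds)) + 1)
    (progresses.zip speeds) 0 0 []

-- ===== PORT B =====
-- max(0, -(-(100 - p) // s)) of Source B
def finishDay (p s : Int) : Int := max 0 (-(PySem.Int.floordiv (-(100 - p)) s))

-- the body of Source B's grouping loop over state (cur, count, answer)
def groupStep (st : Int × Int × List Int) (d : Int) : Int × Int × List Int :=
  if st.2.1 = 0 then (d, 1, st.2.2)
  else if d ≤ st.1 then (st.1, st.2.1 + 1, st.2.2)
  else (d, 1, st.2.2 ++ [st.2.1])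

def solution_alt (progresses : List Int) (speeds : List Int) : List Int :=
  let days := (progresses.zip speeds).map (fun q => finishDay q.1 q.2)
  let st := days.foldl groupStep (0, 0, [])
  st.2.2 ++ [st.2.1]

-- ===== PRECONDITION & SPEC =====
-- Pre_ excludes inputs where A raises IndexError (speeds shorter than progresses) or loops forever
-- (a task with speed ≤ 0 that is not already complete when reached); it thereby also excludes some
-- inputs with a speed ≤ 0 on which A still returns because every such task happens to be already
-- ≥ 100 when reached — there B's ceiling-division day raises on speed 0 or groups differently.
def Pre_solution (progresses : List Int) (speeds : List Int) : Prop :=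
  progresses.length ≤ speeds.length ∧ ∀ q ∈ progresses.zip speeds, 1 ≤ q.2
instance (progresses : List Int) (speeds : List Int) : Decidable (Pre_solution progresses speeds) := by unfold Pre_solution; infer_instance

def pvWitness_solution : List Int × List Int := ([93, 30, 55], [1, 30, 5])

def Spec_solution (progresses : List Int) (speeds : List Int) (out : List Int) : Prop := out = solution_alt progresses speeds
instance (progresses : List Int) (speeds : List Int) (out : List Int) : Decidable (Spec_solution progresses speeds out) := by unfold Spec_solution; infer_instance

-- ===== CLAIM (what is proved, stated in full; the proofs are below) =====
def Claim_equal_solution : Prop := ∀ (progresses : List Int) (speeds : List Int), Dom_solution progresses speeds → Pre_solution progresses speeds → Spec_solution progresses speeds (solution progresses speeds)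

-- ===== LEMMAS AND PROOFS =====

theorem finishDay_nonneg (p s : Int) : 0 ≤ finishDay p s := le_max_left _ _

-- A's completion test at a given date is exactly "finish day ≤ date"
theorem fd_le_iff (p s date : Int) (hs : 1 ≤ s) (hd : 0 ≤ date) :
    finishDay p s ≤ date ↔ 100 ≤ p + date * s := by
  have hspos : (0 : Int) < s := by omega
  unfold finishDay
  rw [max_le_iff]
  constructor
  · rintro ⟨-, h⟩
    rw [neg_le, PySem.Int.le_floordiv_iff_mul_le hspos] at h
    nlinarith
  · intro h
    refine ⟨hd, ?_⟩
    rw [neg_le, PySem.Int.le_floordiv_iff_mul_le hspos]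
    nlinarith

-- with speed ≥ 1 the finish day is at most the remaining work
theorem fd_le_work (p s : Int) (hs : 1 ≤ s) : (finishDay p s).toNat ≤ (100 - p).toNat := by
  have hspos : (0 : Int) < s := by omega
  by_cases hx : (0 : Int) ≤ 100 - p
  · have h : finishDay p s ≤ 100 - p := by
      unfold finishDay
      rw [max_le_iff]
      refine ⟨hx, ?_⟩
      rw [neg_le, PySem.Int.le_floordiv_iff_mul_le hspos]
      nlinarith
    omega
  · have h0 : (0 : Int) ≤ PySem.Int.floordiv (-(100 - p)) s := by
      rw [PySem.Int.le_floordiv_iff_mul_le hspos]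
      nlinarith
    have h : finishDay p s = 0 := by
      unfold finishDay
      exact max_eq_left (by omega)
    omega

theorem solutionLoop_cons (f : Nat) (p s : Int) (rest : List (Int × Int)) (date day : Int)
    (answer : List Int) :
    solutionLoop (f + 1) ((p, s) :: rest) date day answer
      = if 100 ≤ p + date * s then solutionLoop f rest date (day + 1) answer
        else if 0 < day then solutionLoop f ((p, s) :: rest) (date + 1) 0 (answer ++ [day])
        else solutionLoop f ((p, s) :: rest) (date + 1) day answer := rfl

-- one task of A's loop: advance the date to the task's finish day (flushing a pending group once),
-- then consume the task
theorem consume (p s : Int) (rest : List (Int × Int)) (hs : 1 ≤ s) (fuel : Nat) :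
    ∀ (g : Nat) (date day : Int) (ans : List Int),
      0 ≤ date → 0 ≤ day → g = (finishDay p s - date).toNat →
      solutionLoop (g + (fuel + 1)) ((p, s) :: rest) date day ans
        = solutionLoop fuel rest (max date (finishDay p s))
            ((if finishDay p s ≤ date then day else 0) + 1)
            (ans ++ if 0 < day ∧ date < finishDay p s then [day] else []) := by
  intro g
  induction g with
  | zero =>
    intro date day ans hdate hday hg
    have hle : finishDay p s ≤ date := by omega
    have hcond : 100 ≤ p + date * s := (fd_le_iff p s date hs hdate).1 hle
    rw [Nat.zero_add, solutionLoop_cons, if_pos hcond]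
    have h1 : max date (finishDay p s) = date := max_eq_left hle
    have h2 : ¬(0 < day ∧ date < finishDay p s) := by omega
    simp [hle, h2]
  | succ g ih =>
    intro date day ans hdate hday hg
    have hlt : date < finishDay p s := by omega
    have hcond : ¬(100 ≤ p + date * s) := by
      intro hc
      exact absurd ((fd_le_iff p s date hs hdate).2 hc) (by omega)
    have hstep : g + 1 + (fuel + 1) = (g + (fuel + 1)) + 1 := by omega
    have hg' : g = (finishDay p s - (date + 1)).toNat := by omega
    by_cases hdaypos : 0 < day
    · rw [hstep, solutionLoop_cons, if_neg hcond, if_pos hdaypos]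
      rw [ih (date + 1) 0 (ans ++ [day]) (by omega) le_rfl hg']
      have h1 : max (date + 1) (finishDay p s) = finishDay p s := max_eq_right (by omega)
      have h2 : max date (finishDay p s) = finishDay p s := max_eq_right (by omega)
      have h3 : ¬ finishDay p s ≤ date := by omega
      simp [h2, h3, hdaypos, hlt]
    · have hday0 : day = 0 := by omega
      rw [hstep, solutionLoop_cons, if_neg hcond, if_neg hdaypos]
      rw [ih (date + 1) day (ans) (by omega) hday hg']
      have h1 : max (date + 1) (finishDay p s) = finishDay p s := max_eq_right (by omega)
      have h2 : max date (finishDay p s) = finishDay p s := max_eq_right (by omega)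
      simp [h1, h2, hday0]

-- A's whole loop computes B's grouping fold, for any aligned intermediate state
theorem loop_eq_group :
    ∀ (pairs : List (Int × Int)) (fuel : Nat) (date day : Int) (ans : List Int),
      (∀ q ∈ pairs, 1 ≤ q.2) → 0 ≤ date → 0 ≤ day → (day = 0 → date = 0) →
      pairs.length + pvSumW pairs ≤ fuel →
      solutionLoop (fuel + 1) pairs date day ans
        = ((pairs.map (fun q => finishDay q.1 q.2)).foldl groupStep (date, day, ans)).2.2
            ++ [((pairs.map (fun q => finishDay q.1 q.2)).foldl groupStep (date, day, ans)).2.1] := by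
  intro pairs
  induction pairs with
  | nil => intro fuel date day ans _ _ _ _ _; cases fuel <;> simp [solutionLoop]
  | cons q rest ih =>
    obtain ⟨p, s⟩ := q
    intro fuel date day ans hall hdate hday hzero hfuel
    have hs : 1 ≤ s := hall (p, s) (by simp)
    set fd := finishDay p s with hfd
    have hfd0 : 0 ≤ fd := finishDay_nonneg p s
    have hg_le : (fd - date).toNat ≤ (100 - p).toNat := by
      have := fd_le_work p s hs
      omega
    have hlen : rest.length + 1 + ((100 - p).toNat + pvSumW rest) ≤ fuel := by
      simpa [pvSumW] using hfuel
    set g := (fd - date).toNat with hg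
    have hsplit : fuel + 1 = g + ((fuel - g - 1) + 1 + 1) := by omega
    rw [hsplit, consume p s rest hs ((fuel - g - 1) + 1) g date day ans hdate hday rfl]
    have hstep : groupStep (date, day, ans) fd
        = (max date fd, (if fd ≤ date then day else 0) + 1,
            ans ++ if 0 < day ∧ date < fd then [day] else []) := by
      by_cases hday0 : day = 0
      · have hdz : date = 0 := hzero hday0
        simp [groupStep, hday0, hdz, max_eq_right hfd0]
      · by_cases hle : fd ≤ date
        · have : ¬(0 < day ∧ date < fd) := by omega
          simp [groupStep, hday0, hle, this]
        · have : 0 < day ∧ date < fd := by omega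
          simp [groupStep, hday0, hle, max_eq_right (by omega : date ≤ fd), this]
    rw [List.map_cons, List.foldl_cons, hstep]
    exact ih (fuel - g - 1) (max date fd) ((if fd ≤ date then day else 0) + 1)
      (ans ++ if 0 < day ∧ date < fd then [day] else [])
      (fun q hq => hall q (List.mem_cons_of_mem _ hq))
      (le_trans hdate (le_max_left _ _)) (by split <;> omega) (by split <;> omega)
      (by omega)

-- ===== VERDICT (by name: the statement is the Claim_ definition above) =====
theorem solution_spec : Claim_equal_solution := by
  intro progresses speeds _ hpre
  unfold Spec_solution solution solution_alt
  exact loop_eq_group (progresses.zip speeds) ((progresses.zip speeds).length + pvSumW (progresses.zip speeds))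
    0 0 [] hpre.2 le_rfl le_rfl (fun _ => rfl) le_rfl
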